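-- pv_equiv track=rewrite | github.com/mateusznowakdev/keyboard-reducer | src/main.py | _iter_layers_from_raw
-- ===== SOURCE A (Python) =====
-- def _iter_layers_from_raw(raw):
--     """Convert raw data into layer -> row -> col nested arrays"""
--
--     current = []
--
--     for line_no, line in enumerate(raw.splitlines()):
--         if line := line.strip():
--             current.append(line.split())
--         else:
--             if current:
--                 yield current
--                 current = []
--
--     if current:
--         yield current
-- ===== SOURCE B (Python) =====
-- def _iter_layers_from_raw(raw):
--     """Convert raw data into layer -> row -> col nested arrays"""
--
--     lines = raw.splitlines()
--     n = len(lines)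
--     i = 0
--     while i < n:
--         if not lines[i].strip():
--             i += 1
--             continue
--         j = i
--         while j < n and lines[j].strip():
--             j += 1
--         yield [line.split() for line in lines[i:j]]
--         i = j
-- ===== Notes on version B (the rewrite author's own statement) =====
-- stated objective: alternative
-- what changed: Replaced A's accumulator-and-flush single loop (append rows to `current`, emit on blank line and at EOF) by a two-pointer block scan over the line list: skip blank lines, find each maximal run of non-blank lines and emit it as one layer, jumping the cursor past the run.
import Mathlib
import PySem

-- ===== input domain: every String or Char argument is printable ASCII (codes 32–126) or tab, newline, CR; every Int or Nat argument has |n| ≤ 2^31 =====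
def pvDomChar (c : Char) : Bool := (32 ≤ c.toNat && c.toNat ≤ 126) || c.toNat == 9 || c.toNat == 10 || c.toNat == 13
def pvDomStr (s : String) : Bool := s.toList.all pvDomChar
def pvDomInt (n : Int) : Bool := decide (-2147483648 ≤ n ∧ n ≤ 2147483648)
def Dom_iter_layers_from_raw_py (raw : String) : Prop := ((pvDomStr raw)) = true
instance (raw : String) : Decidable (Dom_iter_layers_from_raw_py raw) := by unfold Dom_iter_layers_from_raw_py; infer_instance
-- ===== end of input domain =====

-- B replaces A's accumulator-and-flush loop by two-pointer block scanning over the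
-- line list (skip blank lines, take each maximal non-blank run as one layer);
-- objective: alternative decomposition, same O(n) cost.

-- "line.strip() is truthy" — the test both programs branch on
def pvBlankKey (line : String) : Bool := PySem.Str.strip line != ""

-- ===== PORT A =====
-- one iteration of A's for-loop over (accumulated layers, current)
def pvStepA (st : List (List (List String)) × List (List String)) (line : String) :
    List (List (List String)) × List (List String) :=
  if pvBlankKey line then
    (st.1, st.2 ++ [PySem.Str.split₀ (PySem.Str.strip line)])
  else if st.2 ≠ [] then (st.1 ++ [st.2], []) else st

def iter_layers_from_raw_py (raw : String) : List (List (List String)) :=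
  let st := (PySem.Str.splitlines raw).foldl pvStepA ([], [])
  if st.2 ≠ [] then st.1 ++ [st.2] else st.1

-- ===== PORT B =====
-- two-pointer scan: skip a blank line, or emit the maximal non-blank run and jump past it
def pvBlocks (lines : List String) : List (List (List String)) :=
  match lines with
  | [] => []
  | l :: ls =>
    if pvBlankKey l then
      ((l :: ls.takeWhile pvBlankKey).map PySem.Str.split₀)
        :: pvBlocks (ls.dropWhile pvBlankKey)
    else pvBlocks ls
termination_by lines.length
decreasing_by
  · simp only [List.length_cons]
    exact Nat.lt_succ_of_le (List.length_dropWhile_le _ _)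
  · simp

def iter_layers_from_raw_py_alt (raw : String) : List (List (List String)) :=
  pvBlocks (PySem.Str.splitlines raw)

-- ===== PRECONDITION & SPEC =====
def Spec_iter_layers_from_raw_py (raw : String) (out : List (List (List String))) : Prop := out = iter_layers_from_raw_py_alt raw
instance (raw : String) (out : List (List (List String))) : Decidable (Spec_iter_layers_from_raw_py raw out) := by unfold Spec_iter_layers_from_raw_py; infer_instance

-- ===== CLAIM (what is proved, stated in full; the proofs are below) =====
def Claim_equal_iter_layers_from_raw_py : Prop := ∀ (raw : String), Dom_iter_layers_from_raw_py raw → Spec_iter_layers_from_raw_py raw (iter_layers_from_raw_py raw)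

-- ===== LEMMAS AND PROOFS =====

-- A's loop, as structural recursion carrying `current` (final flush included)
def pvA : List String → List (List String) → List (List (List String))
  | [], cur => if cur ≠ [] then [cur] else []
  | l :: ls, cur =>
    if pvBlankKey l then pvA ls (cur ++ [PySem.Str.split₀ (PySem.Str.strip l)])
    else if cur ≠ [] then cur :: pvA ls [] else pvA ls []

theorem pvBlocks_nil : pvBlocks [] = [] := by
  rw [pvBlocks.eq_def]

theorem pvBlocks_cons (l : String) (ls : List String) :
    pvBlocks (l :: ls) =
      if pvBlankKey l then
        ((l :: ls.takeWhile pvBlankKey).map PySem.Str.split₀)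
          :: pvBlocks (ls.dropWhile pvBlankKey)
      else pvBlocks ls := by
  rw [pvBlocks.eq_def]

theorem pvA_foldl (ls : List String) : ∀ (acc : List (List (List String)))
    (cur : List (List String)),
    (let st := ls.foldl pvStepA (acc, cur);
      if st.2 ≠ [] then st.1 ++ [st.2] else st.1) = acc ++ pvA ls cur := by
  induction ls with
  | nil =>
    intro acc cur
    simp only [List.foldl_nil, pvA]
    split <;> simp
  | cons l ls ih =>
    intro acc cur
    simp only [List.foldl_cons, pvA, pvStepA]
    by_cases hb : pvBlankKey l
    · simp only [hb, if_true, ih]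
    · simp only [hb, Bool.false_eq_true, if_false]
      by_cases hc : cur ≠ []
      · simp [hc, ih]
      · simp only [ne_eq, not_not] at hc
        simp [hc, ih]

-- split() ignores leading/trailing whitespace: split₀ ∘ strip = split₀
theorem go_ws (ws : List Char) (hws : ∀ c ∈ ws, PySem.Chars.isspace c = true) :
    ∀ (cur : List Char) (acc : List (List Char)),
    PySem.Chars.split₀.go ws cur acc = PySem.Chars.split₀.go [] cur acc := by
  induction ws with
  | nil => intro cur acc; rfl
  | cons c ws ih =>
    intro cur acc
    have hc : PySem.Chars.isspace c = true := hws c (by simp)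
    have hws' : ∀ c ∈ ws, PySem.Chars.isspace c = true :=
      fun c hcm => hws c (by simp [hcm])
    simp only [PySem.Chars.split₀.go, hc, if_true]
    simp only [ih hws']
    by_cases hcur : cur.isEmpty
    · rw [if_pos hcur]
      simp [PySem.Chars.split₀.go, hcur]
    · rw [if_neg hcur]
      simp [PySem.Chars.split₀.go, hcur]

theorem go_append_ws (ws : List Char) (hws : ∀ c ∈ ws, PySem.Chars.isspace c = true) :
    ∀ (s : List Char) (cur : List Char) (acc : List (List Char)),
    PySem.Chars.split₀.go (s ++ ws) cur acc = PySem.Chars.split₀.go s cur acc := by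
  intro s
  induction s with
  | nil => intro cur acc; simpa using go_ws ws hws cur acc
  | cons c s ih =>
    intro cur acc
    simp only [List.cons_append, PySem.Chars.split₀.go]
    by_cases hc : PySem.Chars.isspace c
    · simp only [hc, if_true]
      by_cases hcur : cur.isEmpty
      · rw [if_pos hcur, if_pos hcur, ih]
      · rw [if_neg hcur, if_neg hcur, ih]
    · simp only [hc, Bool.false_eq_true, if_false, ih]

theorem split₀_rstrip (s : List Char) :
    PySem.Chars.split₀ (PySem.Chars.rstrip s) = PySem.Chars.split₀ s := by
  have hdec : s = PySem.Chars.rstrip s ++ (s.reverse.takeWhile PySem.Chars.isspace).reverse := by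
    unfold PySem.Chars.rstrip
    conv_lhs => rw [← List.reverse_reverse s]
    rw [← List.reverse_append, List.takeWhile_append_dropWhile]
  have hws : ∀ c ∈ (s.reverse.takeWhile PySem.Chars.isspace).reverse,
      PySem.Chars.isspace c = true := by
    intro c hcm
    exact List.mem_takeWhile_imp (List.mem_reverse.mp hcm)
  unfold PySem.Chars.split₀
  conv_rhs => rw [hdec]
  rw [go_append_ws _ hws]

theorem split₀_lstrip (s : List Char) :
    PySem.Chars.split₀ (PySem.Chars.lstrip s) = PySem.Chars.split₀ s := by
  induction s with
  | nil => rfl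
  | cons c s ih =>
    by_cases hc : PySem.Chars.isspace c
    · have h1 : PySem.Chars.lstrip (c :: s) = PySem.Chars.lstrip s := by
        simp [PySem.Chars.lstrip, hc]
      have h2 : PySem.Chars.split₀ (c :: s) = PySem.Chars.split₀ s := by
        simp [PySem.Chars.split₀, PySem.Chars.split₀.go, hc]
      rw [h1, ih, h2]
    · simp [PySem.Chars.lstrip, hc]

theorem split₀_strip (s : String) :
    PySem.Str.split₀ (PySem.Str.strip s) = PySem.Str.split₀ s := by
  simp only [PySem.Str.split₀, PySem.Str.strip, PySem.Chars.strip, String.toList_ofList]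
  rw [split₀_rstrip, split₀_lstrip]

-- main invariant: pvA with empty/nonempty `current` versus block scanning
theorem pvA_blocks (ls : List String) :
    (pvA ls [] = pvBlocks ls) ∧
    ∀ cur : List (List String), cur ≠ [] →
      pvA ls cur = (cur ++ (ls.takeWhile pvBlankKey).map PySem.Str.split₀)
        :: pvBlocks (ls.dropWhile pvBlankKey) := by
  induction ls with
  | nil =>
    constructor
    · simp [pvA, pvBlocks_nil]
    · intro cur hcur
      simp [pvA, pvBlocks_nil, hcur]
  | cons l ls ih =>
    obtain ⟨ihP, ihQ⟩ := ih
    by_cases hb : pvBlankKey l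
    · constructor
      · simp only [pvA, hb, if_true, List.nil_append]
        rw [ihQ _ (by simp), split₀_strip, pvBlocks_cons]
        simp [hb]
      · intro cur hcur
        simp only [pvA, hb, if_true]
        rw [ihQ _ (by simp), split₀_strip]
        simp [hb]
    · constructor
      · have h1 : pvA (l :: ls) [] = pvA ls [] := by simp [pvA, hb]
        rw [h1, ihP, pvBlocks_cons, if_neg (by simp [hb])]
      · intro cur hcur
        have h1 : pvA (l :: ls) cur = cur :: pvA ls [] := by simp [pvA, hb, hcur]
        rw [h1, ihP]
        simp only [List.takeWhile_cons, List.dropWhile_cons, hb,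
          Bool.false_eq_true, if_false]
        rw [pvBlocks_cons, if_neg (by simp [hb])]
        simp

-- ===== VERDICT (by name: the statement is the Claim_ definition above) =====
theorem iter_layers_from_raw_py_spec : Claim_equal_iter_layers_from_raw_py := by
  intro raw _
  unfold Spec_iter_layers_from_raw_py iter_layers_from_raw_py iter_layers_from_raw_py_alt
  have h := pvA_foldl (PySem.Str.splitlines raw) [] []
  simp only at h
  rw [h, List.nil_append, (pvA_blocks _).1]
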